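-- pv_equiv track=rewrite | github.com/NVIDIA/Model-Optimizer | modelopt/torch/puzzletron/puzzletron_nas_plugin.py | _progress_step
-- ===== SOURCE A (Python) =====
-- _StageName = str
--
-- _STAGE_ORDER: tuple[_StageName, ...] = (
--     "start",
--     "convert",
--     "score_activations",
--     "prune",
--     "bypass",
--     "build_library",
--     "score_blocks",
--     "mip",
--     "complete",
-- )
--
-- def _total_steps(hydra_cfg) -> int:
--     """Return total pipeline step count: 9 with bypass, 8 without."""
--     return 9 if hydra_cfg.get("bypass", None) is not None else 8
--
-- def _progress_step(hydra_cfg, stage: _StageName) -> tuple[int, int]: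
--     """Return ``(step_number, total_steps)`` for a given pipeline stage.
--
--     Single source of truth for the user-facing ``Puzzletron Progress N/T`` strings —
--     keeps numbering coherent across ``main.py``, ``convert_puzzletron_model``, and
--     ``PuzzletronSearcher.run_search``, and shifts MIP/realize automatically when
--     bypass is added or removed.
--     """
--     has_bypass = hydra_cfg.get("bypass", None) is not None
--     total = _total_steps(hydra_cfg)
--     step = 0
--     for s in _STAGE_ORDER:
--         if s == "bypass" and not has_bypass:
--             continue
--         step += 1
--         if s == stage:
--             return step, total
--     raise ValueError(f"Unknown pipeline stage: {stage!r}")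
-- ===== SOURCE B (Python) =====
-- _StageName = str
--
-- _STAGE_ORDER: tuple[_StageName, ...] = (
--     "start",
--     "convert",
--     "score_activations",
--     "prune",
--     "bypass",
--     "build_library",
--     "score_blocks",
--     "mip",
--     "complete",
-- )
--
-- _BYPASS_IDX = _STAGE_ORDER.index("bypass")
--
--
-- def _progress_step(hydra_cfg, stage):
--     has_bypass = hydra_cfg.get("bypass", None) is not None
--     total = 9 if has_bypass else 8
--     try:
--         idx = _STAGE_ORDER.index(stage)
--     except ValueError:
--         raise ValueError(f"Unknown pipeline stage: {stage!r}") from None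
--     if not has_bypass:
--         if idx == _BYPASS_IDX:
--             raise ValueError(f"Unknown pipeline stage: {stage!r}")
--         if idx > _BYPASS_IDX:
--             idx -= 1
--     return idx + 1, total
-- ===== Notes on version B (the rewrite author's own statement) =====
-- stated objective: simpler
-- what changed: Replaces the scan-and-skip counting loop with a direct positional lookup (_STAGE_ORDER.index) plus a constant off-by-one adjustment after the bypass slot.
-- outside the precondition, e.g. on _progress_step({}, 'unknown'): A raises ValueError, B raises ValueError; on _progress_step({}, 'bypass'): A raises ValueError, B raises ValueError
import Mathlib
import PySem

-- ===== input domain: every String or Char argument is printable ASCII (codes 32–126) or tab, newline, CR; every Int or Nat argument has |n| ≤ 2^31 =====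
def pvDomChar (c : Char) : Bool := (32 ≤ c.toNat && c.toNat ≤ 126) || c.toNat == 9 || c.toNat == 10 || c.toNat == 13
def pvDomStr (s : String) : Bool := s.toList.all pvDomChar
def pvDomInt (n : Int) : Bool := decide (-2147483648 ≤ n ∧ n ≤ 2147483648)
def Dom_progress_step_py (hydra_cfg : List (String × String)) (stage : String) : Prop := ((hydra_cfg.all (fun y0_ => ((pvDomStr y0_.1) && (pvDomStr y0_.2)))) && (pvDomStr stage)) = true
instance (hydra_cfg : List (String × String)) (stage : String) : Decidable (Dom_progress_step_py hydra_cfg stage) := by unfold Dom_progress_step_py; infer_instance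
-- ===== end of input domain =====

-- B replaces A's scan-and-skip counting loop by a direct positional lookup plus a
-- constant adjustment after the bypass slot (objective: simpler); same cost.

-- ===== PORT A =====
def pvStageOrder : List String :=
  ["start", "convert", "score_activations", "prune", "bypass",
   "build_library", "score_blocks", "mip", "complete"]

def pvTotalSteps (hydra_cfg : List (String × String)) : Int :=
  if ((PySem.Dict.mk hydra_cfg).get? "bypass").isSome then 9 else 8

-- the 'for s in _STAGE_ORDER' loop; none = the fall-through 'raise ValueError'
def pvALoop (has_bypass : Bool) (stage : String) : List String → Int → Option Int
  | [], _ => none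
  | s :: rest, step =>
    if s == "bypass" && !has_bypass then pvALoop has_bypass stage rest step
    else
      if s == stage then some (step + 1) else pvALoop has_bypass stage rest (step + 1)

def progress_step_py (hydra_cfg : List (String × String)) (stage : String) : Int × Int :=
  let has_bypass := ((PySem.Dict.mk hydra_cfg).get? "bypass").isSome
  let total := pvTotalSteps hydra_cfg
  match pvALoop has_bypass stage pvStageOrder 0 with
  | some step => (step, total)
  | none => (0, 0)   -- Python raises ValueError here; excluded by Pre_

-- ===== PORT B =====
def progress_step_py_alt (hydra_cfg : List (String × String)) (stage : String) : Int × Int :=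
  let has_bypass := ((PySem.Dict.mk hydra_cfg).get? "bypass").isSome
  let total : Int := if has_bypass then 9 else 8
  match PySem.List.index? pvStageOrder stage with
  | none => (0, 0)   -- Python raises ValueError here; excluded by Pre_
  | some idx =>
    if !has_bypass then
      if idx == 4 then (0, 0)   -- Python raises ValueError here; excluded by Pre_
      else if idx > 4 then ((idx : Int), total)
      else ((idx : Int) + 1, total)
    else ((idx : Int) + 1, total)

-- ===== PRECONDITION & SPEC =====
-- Pre_ excludes exactly the inputs where A raises ValueError: a stage not in
-- _STAGE_ORDER, or stage "bypass" when the config has no "bypass" key.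
def Pre_progress_step_py (hydra_cfg : List (String × String)) (stage : String) : Prop :=
  stage ∈ pvStageOrder ∧
    (stage = "bypass" → ((PySem.Dict.mk hydra_cfg).get? "bypass").isSome = true)
instance (hydra_cfg : List (String × String)) (stage : String) : Decidable (Pre_progress_step_py hydra_cfg stage) := by unfold Pre_progress_step_py; infer_instance

def pvWitness_progress_step_py : (List (String × String)) × String := ([("bypass", "on")], "mip")

def Spec_progress_step_py (hydra_cfg : List (String × String)) (stage : String) (out : Int × Int) : Prop := out = progress_step_py_alt hydra_cfg stage
instance (hydra_cfg : List (String × String)) (stage : String) (out : Int × Int) : Decidable (Spec_progress_step_py hydra_cfg stage out) := by unfold Spec_progress_step_py; infer_instance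

-- ===== CLAIM (what is proved, stated in full; the proofs are below) =====
def Claim_equal_progress_step_py : Prop := ∀ (hydra_cfg : List (String × String)) (stage : String), Dom_progress_step_py hydra_cfg stage → Pre_progress_step_py hydra_cfg stage → Spec_progress_step_py hydra_cfg stage (progress_step_py hydra_cfg stage)

-- ===== LEMMAS AND PROOFS =====

-- both sides depend on hydra_cfg only through the bypass flag; with the stage a
-- literal and the flag fixed, both sides evaluate.
theorem pv_agree (hydra_cfg : List (String × String)) (stage : String)
    (hmem : stage ∈ pvStageOrder)
    (hby : stage = "bypass" → ((PySem.Dict.mk hydra_cfg).get? "bypass").isSome = true) :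
    progress_step_py hydra_cfg stage = progress_step_py_alt hydra_cfg stage := by
  cases h : ((PySem.Dict.mk hydra_cfg).get? "bypass").isSome <;>
    simp [pvStageOrder] at hmem <;>
    rcases hmem with rfl | rfl | rfl | rfl | rfl | rfl | rfl | rfl | rfl <;>
    simp_all [progress_step_py, progress_step_py_alt, pvALoop, pvStageOrder,
      pvTotalSteps, PySem.List.index?] <;> rfl

-- ===== VERDICT (by name: the statement is the Claim_ definition above) =====
theorem progress_step_py_spec : Claim_equal_progress_step_py := by
  intro hydra_cfg stage _ hpre
  exact pv_agree hydra_cfg stage hpre.1 hpre.2
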